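-- pv_equiv track=rewrite | github.com/LucSkyvvalker/TAUS | scripts/character_mismatch.py | getMismatch
-- ===== SOURCE A (Python) =====
-- def getMismatch(source, target):
--     tgtBrack = 0
--     tgtAccolade = 0
--     srcBrack = 0
--     srcAccolade = 0
--     # check for mismatches in target sentence
--     for char in str(target):
--         if char == '(':
--             tgtBrack = 1
--         if tgtBrack == 1 and char == ')':
--             tgtBrack = 0
--         if char == '"':
--             tgtAccolade = 1
--         if tgtAccolade == 1 and char == '"':
--             tgtAccolade = 0
--     # if mismatch, check if it was present in source
--     if tgtBrack == 1 or tgtAccolade == 1: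
--         for char in str(source):
--             if char == '(':
--                 srcBrack = 1
--             if srcBrack == 1 and char == ')':
--                 srcBrack = 0
--             if char == '"':
--                 srcAccolade = 1
--             if srcAccolade == 1 and char == '"':
--                 srcAccolade = 0
--         # if present in src, mismatch is false
--         if srcBrack == 1 and tgtBrack == 1:
--             tgtBrack = 0
--         if srcAccolade == 1 and tgtAccolade == 1:
--             tgtAccolade = 0
--     return (tgtBrack+tgtAccolade)
-- ===== SOURCE B (Python) =====
-- def getMismatch(source, target):
--     # A's quote flags are always 0 after the loop (a '"' sets then clears the
--     # flag in the same iteration), so only an unclosed trailing '(' matters: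
--     # scan back-to-front and stop at the first paren seen.
--     def unclosed(s):
--         for ch in reversed(str(s)):
--             if ch == '(':
--                 return True
--             if ch == ')':
--                 return False
--         return False
--
--     if not unclosed(target):
--         return 0
--     return 0 if unclosed(source) else 1
-- ===== Notes on version B (the rewrite author's own statement) =====
-- stated objective: simpler
-- what changed: Drops A's dead quote-flag logic (always 0 after the loop) and replaces the full forward flag-update scans by a back-to-front early-exit scan for the last paren, scanning source only when the target has an unclosed '('.
import Mathlib
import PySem

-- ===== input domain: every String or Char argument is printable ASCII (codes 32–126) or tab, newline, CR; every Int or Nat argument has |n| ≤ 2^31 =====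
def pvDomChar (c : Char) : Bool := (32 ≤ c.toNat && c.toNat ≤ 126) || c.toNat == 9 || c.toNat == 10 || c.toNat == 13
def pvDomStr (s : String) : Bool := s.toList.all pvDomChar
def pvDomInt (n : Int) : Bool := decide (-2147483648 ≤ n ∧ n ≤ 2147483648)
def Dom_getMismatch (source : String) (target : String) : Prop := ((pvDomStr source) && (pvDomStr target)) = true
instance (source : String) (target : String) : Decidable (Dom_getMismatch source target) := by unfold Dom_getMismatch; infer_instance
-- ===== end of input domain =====

-- B drops A's dead quote-flag logic (the flag is always 0 after each iteration) and
-- finds the unclosed '(' by a back-to-front early-exit scan instead of forward flag updates.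

-- ===== PORT A =====
-- one iteration of A's loop body over the state (brack, accolade)
def pvStepA (st : Int × Int) (c : Char) : Int × Int :=
  let b := if c = '(' then (1 : Int) else st.1
  let b := if b = 1 ∧ c = ')' then (0 : Int) else b
  let a := if c = '"' then (1 : Int) else st.2
  let a := if a = 1 ∧ c = '"' then (0 : Int) else a
  (b, a)

def getMismatch (source : String) (target : String) : Int :=
  let t := target.toList.foldl pvStepA (0, 0)
  if t.1 = 1 ∨ t.2 = 1 then
    let s := source.toList.foldl pvStepA (0, 0)
    let tb := if s.1 = 1 ∧ t.1 = 1 then (0 : Int) else t.1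
    let ta := if s.2 = 1 ∧ t.2 = 1 then (0 : Int) else t.2
    tb + ta
  else
    t.1 + t.2

-- ===== PORT B =====
-- back-to-front scan: the first paren seen from the end decides
def pvUnclosedRev : List Char → Bool
  | [] => false
  | c :: rest => if c = '(' then true else if c = ')' then false else pvUnclosedRev rest

def getMismatch_alt (source : String) (target : String) : Int :=
  if ¬ pvUnclosedRev target.toList.reverse then 0
  else if pvUnclosedRev source.toList.reverse then 0 else 1

-- ===== PRECONDITION & SPEC =====
def Spec_getMismatch (source : String) (target : String) (out : Int) : Prop := out = getMismatch_alt source target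
instance (source : String) (target : String) (out : Int) : Decidable (Spec_getMismatch source target out) := by unfold Spec_getMismatch; infer_instance

-- ===== CLAIM (what is proved, stated in full; the proofs are below) =====
def Claim_equal_getMismatch : Prop := ∀ (source : String) (target : String), Dom_getMismatch source target → Spec_getMismatch source target (getMismatch source target)

-- ===== LEMMAS AND PROOFS =====

-- A's fold, characterised: accolade component is always 0, brack component is
-- decided by the last paren character (= pvUnclosedRev of the reverse).
theorem pvFoldA_char (l : List Char) :
    l.foldl pvStepA (0, 0) = ((if pvUnclosedRev l.reverse then (1 : Int) else 0), (0 : Int)) := by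
  induction l using List.reverseRecOn with
  | nil => simp [pvUnclosedRev]
  | append_singleton xs c ih =>
    rw [List.foldl_append, ih]
    simp only [List.foldl, List.reverse_append, List.reverse_singleton, List.singleton_append,
      pvUnclosedRev, pvStepA]
    by_cases h1 : c = '(' <;> by_cases h2 : c = ')' <;> by_cases h3 : c = '"' <;>
      simp_all

theorem getMismatch_eq (source target : String) :
    getMismatch source target = getMismatch_alt source target := by
  unfold getMismatch getMismatch_alt
  rw [pvFoldA_char target.toList, pvFoldA_char source.toList]
  by_cases ht : pvUnclosedRev target.toList.reverse <;>
    by_cases hs : pvUnclosedRev source.toList.reverse <;> simp [ht, hs]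

-- ===== VERDICT (by name: the statement is the Claim_ definition above) =====
theorem getMismatch_spec : Claim_equal_getMismatch := by
  intro source target _
  exact getMismatch_eq source target
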